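-- pv_equiv track=rewrite | github.com/Milkeyyy/R6SSS_WebAPI | utilities.py | reorder_dict_with_remaining
-- ===== SOURCE A (Python) =====
-- def reorder_dict_with_remaining(original_dict, key_order_list):
-- 	"""
-- 	指定されたキーリストの順序で辞書を再構築し、
-- 	その後、キーリストに含まれていなかった元の辞書のキーを（元の順序で）追加します。
--
-- 	Args:
-- 		original_dict (dict): 元の辞書。
-- 		key_order_list (list): 望ましいキーの順序を指定するリスト。
--
-- 	Returns:
-- 		dict: 再順序付けされた新しい辞書。
-- 	"""
-- 	reordered_dict = {}
-- 	processed_keys = set() # 既に追加されたキーを追跡するためのセット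
--
-- 	# 1. key_order_list に従ってキーを追加
-- 	for key in key_order_list:
-- 		if key in original_dict:
-- 			reordered_dict[key] = original_dict[key]
-- 			processed_keys.add(key)
--
-- 	# 2. 元の辞書に残っているキーを（元の挿入順で）追加
-- 	for key, value in original_dict.items():
-- 		if key not in processed_keys:
-- 			reordered_dict[key] = value
--
-- 	return reordered_dict
-- ===== SOURCE B (Python) =====
-- def reorder_dict_with_remaining(original_dict, key_order_list):
-- 	"""Rank-and-sort: assign every key a unique numeric rank (first position in
-- 	key_order_list if listed, else len(key_order_list) + its position in the
-- 	original dict), then rebuild the dict by one sort of the items by rank."""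
-- 	rank = {}
-- 	for i, key in enumerate(key_order_list):
-- 		rank.setdefault(key, i)
-- 	n = len(key_order_list)
-- 	for j, key in enumerate(original_dict):
-- 		rank.setdefault(key, n + j)
-- 	return dict(sorted(original_dict.items(), key=lambda item: rank[item[0]]))
-- ===== Notes on version B (the rewrite author's own statement) =====
-- stated objective: alternative
-- what changed: Replaces A's two insertion passes (seed listed keys while tracking a processed_keys set, then append unprocessed items) by a rank-and-sort algorithm: every key gets a unique numeric rank (first position in key_order_list, else list length plus original position) and one stable sort of the items by rank rebuilds the dict; Pre_ only excludes association lists with duplicate keys, which cannot arise from a real Python dict argument (the Lean encoding's accidental corner).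
import Mathlib
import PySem

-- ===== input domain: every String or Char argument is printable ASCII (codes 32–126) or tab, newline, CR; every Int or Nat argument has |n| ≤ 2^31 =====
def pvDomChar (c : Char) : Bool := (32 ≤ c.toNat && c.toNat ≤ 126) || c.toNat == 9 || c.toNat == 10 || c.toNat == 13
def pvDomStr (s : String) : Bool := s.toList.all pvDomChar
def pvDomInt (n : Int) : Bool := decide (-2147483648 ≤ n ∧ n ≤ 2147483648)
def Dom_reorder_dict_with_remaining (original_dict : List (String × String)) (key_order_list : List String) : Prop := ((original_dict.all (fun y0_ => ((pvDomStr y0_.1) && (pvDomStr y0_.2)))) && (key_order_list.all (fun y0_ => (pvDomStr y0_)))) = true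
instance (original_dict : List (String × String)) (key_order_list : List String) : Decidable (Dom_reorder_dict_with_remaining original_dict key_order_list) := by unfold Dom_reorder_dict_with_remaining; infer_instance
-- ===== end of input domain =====

-- B replaces A's two insertion passes by a rank-and-sort algorithm: every key gets a
-- unique numeric rank and one stable sort of the items rebuilds the dict; alternative
-- algorithm of similar size, not claimed faster.

-- ===== PORT A =====
-- literal transliteration: loop 1 builds (reordered_dict, processed_keys),
-- loop 2 appends the unprocessed original items.  original_dict[key] is only read
-- under the 'key in original_dict' guard, so getD with "" is exact there.
def reorder_dict_with_remaining (original_dict : List (String × String)) (key_order_list : List String) : List (String × String) :=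
  let od : PySem.Dict String String := PySem.Dict.mk original_dict
  let st := key_order_list.foldl
    (fun (st : PySem.Dict String String × PySem.Set String) key =>
      if od.contains key then (st.1.insert key (od.getD key ""), PySem.Set.add st.2 key) else st)
    (PySem.Dict.empty, PySem.Set.empty)
  let final := od.items.foldl
    (fun d p => if PySem.Set.contains st.2 p.1 then d else d.insert p.1 p.2) st.1
  final.items

-- ===== PORT B =====
-- literal transliteration of Source B: two setdefault loops seed the rank map, then one
-- stable sort of the items by rank.  rank[item[0]] is read only at keys of the
-- original dict, which the second loop has all seeded, so getD 0 is exact there.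
def reorder_dict_with_remaining_alt (original_dict : List (String × String)) (key_order_list : List String) : List (String × String) :=
  let od : PySem.Dict String String := PySem.Dict.mk original_dict
  let rank1 := (PySem.List.enumerate key_order_list).foldl
    (fun (d : PySem.Dict String Int) p => d.setdefault p.2 p.1) PySem.Dict.empty
  let n : Int := key_order_list.length
  let rank := (PySem.List.enumerate od.keys).foldl
    (fun (d : PySem.Dict String Int) p => d.setdefault p.2 (n + p.1)) rank1
  (PySem.Dict.update PySem.Dict.empty
    (PySem.List.sorted od.items (fun item => rank.getD item.1 0))).items

-- ===== PRECONDITION & SPEC =====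
-- Pre_ excludes association lists with duplicate keys: a real Python dict argument can
-- never have them, and on such encodings A keeps the first duplicate value while B keeps
-- the last — both accidental.
def Pre_reorder_dict_with_remaining (original_dict : List (String × String)) (key_order_list : List String) : Prop :=
  (original_dict.map Prod.fst).Nodup
instance (original_dict : List (String × String)) (key_order_list : List String) : Decidable (Pre_reorder_dict_with_remaining original_dict key_order_list) := by unfold Pre_reorder_dict_with_remaining; infer_instance

def pvWitness_reorder_dict_with_remaining : (List (String × String)) × List String :=
  ([("a", "1"), ("b", "2")], ["b", "z"])

def Spec_reorder_dict_with_remaining (original_dict : List (String × String)) (key_order_list : List String) (out : List (String × String)) : Prop := out = reorder_dict_with_remaining_alt original_dict key_order_list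
instance (original_dict : List (String × String)) (key_order_list : List String) (out : List (String × String)) : Decidable (Spec_reorder_dict_with_remaining original_dict key_order_list out) := by unfold Spec_reorder_dict_with_remaining; infer_instance

-- ===== CLAIM (what is proved, stated in full; the proofs are below) =====
def Claim_equal_reorder_dict_with_remaining : Prop := ∀ (original_dict : List (String × String)) (key_order_list : List String), Dom_reorder_dict_with_remaining original_dict key_order_list → Pre_reorder_dict_with_remaining original_dict key_order_list → Spec_reorder_dict_with_remaining original_dict key_order_list (reorder_dict_with_remaining original_dict key_order_list)

-- ===== LEMMAS AND PROOFS =====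

-- Loop 1 of A: the dict component ignores the set component.
theorem pv_loop1_fst (od : PySem.Dict String String) (kol : List String)
    (d : PySem.Dict String String) (s : PySem.Set String) :
    (kol.foldl (fun (st : PySem.Dict String String × PySem.Set String) key =>
        if od.contains key then (st.1.insert key (od.getD key ""), PySem.Set.add st.2 key) else st)
      (d, s)).1
    = kol.foldl (fun d k => if od.contains k then d.insert k (od.getD k "") else d) d := by
  induction kol generalizing d s with
  | nil => rfl
  | cons k t ih =>
    by_cases h : od.contains k = true <;> simp [h, ih]

-- set.add membership, as a Bool equation.
theorem pv_set_contains_add (s : PySem.Set String) (x k : String) :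
    PySem.Set.contains (PySem.Set.add s x) k = (PySem.Set.contains s k || k == x) := by
  simp [PySem.Set.add_eq_ite]
  by_cases hm : x ∈ s
  · simp [hm]
    by_cases hk : k = x <;> simp [hk, hm]
  · simp [hm]
    by_cases hk : k = x <;> simp [hk]

-- processed_keys tracks exactly the keys of the dict built so far.
theorem pv_loop1_set (od : PySem.Dict String String) (kol : List String)
    (d : PySem.Dict String String) (s : PySem.Set String)
    (hinv : ∀ k, PySem.Set.contains s k = d.contains k) :
    ∀ k, PySem.Set.contains
        (kol.foldl (fun (st : PySem.Dict String String × PySem.Set String) key =>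
            if od.contains key then (st.1.insert key (od.getD key ""), PySem.Set.add st.2 key) else st)
          (d, s)).2 k
      = (kol.foldl (fun (st : PySem.Dict String String × PySem.Set String) key =>
            if od.contains key then (st.1.insert key (od.getD key ""), PySem.Set.add st.2 key) else st)
          (d, s)).1.contains k := by
  induction kol generalizing d s with
  | nil => exact hinv
  | cons key t ih =>
    by_cases h : od.contains key = true
    · simp only [List.foldl_cons, h, if_pos]
      refine ih _ _ (fun k => ?_)
      rw [pv_set_contains_add, PySem.Dict.contains_insert, hinv]
      exact Bool.or_comm _ _
    · simp only [List.foldl_cons, h, if_neg, Bool.false_eq_true, not_false_iff]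
      exact ih _ _ hinv

-- an insert loop whose value depends only on the key: lookup characterisation.
theorem pv_get?_foldl_insert_const (L : List String) (g : String → String)
    (d : PySem.Dict String String) (k : String) :
    (L.foldl (fun d k => d.insert k (g k)) d).get? k
      = if k ∈ L then some (g k) else d.get? k := by
  induction L generalizing d with
  | nil => simp
  | cons a t ih =>
    simp only [List.foldl_cons, ih, PySem.Dict.get?_insert, List.mem_cons]
    by_cases hk : k ∈ t
    · simp [hk]
    · by_cases ha : k = a <;> simp [hk, ha]

-- B's Dict.update is the unconditional insert fold.
theorem pv_update_eq_foldl (d : PySem.Dict String String) (l : List (String × String)) :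
    PySem.Dict.update d l = l.foldl (fun d p => d.insert p.1 p.2) d := by
  induction l generalizing d with
  | nil => rfl
  | cons p t ih => simpa using ih (d.insert p.1 p.2)

-- ofList over a snoc.
theorem pv_ofList_append (l : List String) (x : String) :
    PySem.Set.ofList (l ++ [x]) = PySem.Set.add (PySem.Set.ofList l) x := by
  rw [PySem.Set.ofList, PySem.Set.ofList, List.foldl_append]
  rfl

-- ofList of a duplicate-free list is the list itself.
theorem pv_ofList_eq_self (l : List String) (h : l.Nodup) : PySem.Set.ofList l = l := by
  induction l using List.reverseRecOn with
  | nil => rfl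
  | append_singleton t x ih =>
    have hx : x ∉ t := by simp [List.nodup_append] at h; tauto
    have ht : t.Nodup := (List.nodup_append.mp h).1
    rw [pv_ofList_append, PySem.Set.add_eq_ite, ih ht]
    simp [hx]

-- first-occurrence dedup lists keys in strictly increasing first-index order.
theorem pv_ofList_pairwise_idxOf (l : List String) :
    (PySem.Set.ofList l).Pairwise (fun a b => List.idxOf a l < List.idxOf b l) := by
  induction l using List.reverseRecOn with
  | nil => simp [PySem.Set.ofList]
  | append_singleton t x ih =>
    rw [pv_ofList_append, PySem.Set.add_eq_ite]
    by_cases hx : x ∈ PySem.Set.ofList t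
    · simp only [hx, if_pos]
      refine ih.imp_of_mem ?_
      intro a b ha hb hab
      have ha' : a ∈ t := (PySem.Set.mem_ofList t a).mp ha
      have hb' : b ∈ t := (PySem.Set.mem_ofList t b).mp hb
      rwa [List.idxOf_append, List.idxOf_append, if_pos ha', if_pos hb']
    · simp only [hx, if_neg, not_false_iff]
      have hx' : x ∉ t := fun h => hx ((PySem.Set.mem_ofList t x).mpr h)
      rw [List.pairwise_append]
      refine ⟨ih.imp_of_mem ?_, by simp, ?_⟩
      · intro a b ha hb hab
        have ha' : a ∈ t := (PySem.Set.mem_ofList t a).mp ha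
        have hb' : b ∈ t := (PySem.Set.mem_ofList t b).mp hb
        rwa [List.idxOf_append, List.idxOf_append, if_pos ha', if_pos hb']
      · intro a ha b hb
        simp only [List.mem_singleton] at hb
        subst hb
        have ha' : a ∈ t := (PySem.Set.mem_ofList t a).mp ha
        rw [List.idxOf_append, List.idxOf_append, if_pos ha', if_neg hx']
        have h1 : List.idxOf a t < t.length := List.idxOf_lt_length_of_mem ha'
        omega

-- positions in a filtered list order keys the same way as in the full list.
theorem pv_idxOf_filter_lt (l : List String) (p : String → Bool) (a b : String)
    (ha : a ∈ l.filter p) (hb : b ∈ l.filter p)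
    (h : List.idxOf a (l.filter p) < List.idxOf b (l.filter p)) :
    List.idxOf a l < List.idxOf b l := by
  induction l with
  | nil => simp at ha
  | cons x t ih =>
    by_cases hp : p x = true
    · rw [List.filter_cons_of_pos hp] at ha hb h
      by_cases hax : a = x
      · subst hax
        have hbx : b ≠ a := by
          intro hba; subst hba; simp at h
        rw [List.idxOf_cons_self] at *
        rw [List.idxOf_cons_ne _ (Ne.symm hbx)]
        omega
      · by_cases hbx : b = x
        · subst hbx
          rw [List.idxOf_cons_ne _ (Ne.symm hax), List.idxOf_cons_self] at h
          omega
        · have ha' : a ∈ t.filter p := by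
            rcases List.mem_cons.mp ha with h' | h' <;> [exact absurd h' hax; exact h']
          have hb' : b ∈ t.filter p := by
            rcases List.mem_cons.mp hb with h' | h' <;> [exact absurd h' hbx; exact h']
          rw [List.idxOf_cons_ne _ (Ne.symm hax), List.idxOf_cons_ne _ (Ne.symm hbx)] at h
          rw [List.idxOf_cons_ne _ (Ne.symm hax), List.idxOf_cons_ne _ (Ne.symm hbx)]
          have := ih ha' hb' (by omega)
          omega
    · rw [List.filter_cons_of_neg hp] at ha hb h
      have hax : a ≠ x := by
        intro h'; subst h'; exact hp (List.of_mem_filter ha)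
      have hbx : b ≠ x := by
        intro h'; subst h'; exact hp (List.of_mem_filter hb)
      rw [List.idxOf_cons_ne _ (Ne.symm hax), List.idxOf_cons_ne _ (Ne.symm hbx)]
      have := ih ha hb h
      omega

-- the setdefault-over-enumerate loop: lookup keeps the first-seeded value.
theorem pv_setdefault_enum (l : List String) (c : Int) :
    ∀ (s : Int) (d : PySem.Dict String Int) (k : String),
    ((PySem.List.enumerate l s).foldl (fun d p => d.setdefault p.2 (c + p.1)) d).get? k
      = (d.get? k).or (if k ∈ l then some (c + s + (List.idxOf k l : Int)) else none) := by
  induction l with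
  | nil => intro s d k; simp [PySem.List.enumerate_nil]
  | cons a t ih =>
    intro s d k
    rw [PySem.List.enumerate_cons, List.foldl_cons, ih]
    by_cases hk : k = a
    · subst hk
      rw [PySem.Dict.get?_setdefault_self]
      rw [Option.some_or]
      simp only [List.mem_cons, true_or, if_pos, List.idxOf_cons_self]
      cases hd : d.get? k <;> simp
    · rw [PySem.Dict.get?_setdefault_of_ne _ _ hk]
      by_cases ht : k ∈ t
      · have : k ∈ a :: t := List.mem_cons_of_mem _ ht
        simp only [ht, if_pos, this, List.idxOf_cons_ne _ (Ne.symm hk)]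
        push_cast
        ring_nf
      · have : k ∉ a :: t := by simp [hk, ht]
        simp [ht, this]

-- ===== VERDICT (by name: the statement is the Claim_ definition above) =====
theorem reorder_dict_with_remaining_spec : Claim_equal_reorder_dict_with_remaining := by
  intro original_dict key_order_list _hdom hpre
  unfold Spec_reorder_dict_with_remaining
  unfold reorder_dict_with_remaining reorder_dict_with_remaining_alt
  simp only []
  set od : PySem.Dict String String := PySem.Dict.mk original_dict with hod
  have hknd : od.keys.Nodup := hpre
  -- ---------- A side ----------
  set st := key_order_list.foldl
    (fun (st : PySem.Dict String String × PySem.Set String) key =>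
      if od.contains key then (st.1.insert key (od.getD key ""), PySem.Set.add st.2 key) else st)
    (PySem.Dict.empty, PySem.Set.empty) with hst
  set L := key_order_list.filter (fun k => od.contains k) with hL
  set D := PySem.Set.ofList L with hD
  have h1f : st.1 = L.foldl (fun d k => d.insert k (od.getD k "")) PySem.Dict.empty := by
    rw [hst, pv_loop1_fst, hL, ← PySem.List.foldl_if_eq_foldl_filter]
  have hget : ∀ k, st.1.get? k = if k ∈ L then some (od.getD k "") else none := by
    intro k; rw [h1f, pv_get?_foldl_insert_const]; simp [PySem.Dict.get?_empty]
  have hkeys1 : st.1.keys = D := by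
    rw [h1f, PySem.Dict.keys_foldl_insert]; rfl
  have hDnd : D.Nodup := by rw [hD]; exact PySem.Set.nodup_ofList L
  have hnd1 : st.1.keys.Nodup := by rw [hkeys1]; exact hDnd
  have hcont1 : ∀ k, st.1.contains k = true ↔ k ∈ L := by
    intro k
    rw [PySem.Dict.contains_eq_isSome_get?, hget]
    by_cases hk : k ∈ L <;> simp [hk]
  have hitems1 : st.1.items = D.map (fun k => (k, od.getD k "")) := by
    rw [PySem.Dict.items_eq_map_keys st.1 hnd1 "", hkeys1]
    apply List.map_congr_left
    intro k hk
    have hkL : k ∈ L := by rw [hD, PySem.Set.mem_ofList] at hk; exact hk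
    rw [PySem.Dict.getD_eq_get?_getD, hget, if_pos hkL]
    rfl
  have hS : ∀ k, PySem.Set.contains st.2 k = st.1.contains k := by
    rw [hst]
    exact pv_loop1_set od key_order_list PySem.Dict.empty PySem.Set.empty (fun k => rfl)
  -- loop 2 of A: fresh distinct keys append
  set R := od.items.filter (fun p => !(st.1.contains p.1)) with hR
  have hloop2 : od.items.foldl
      (fun d p => if PySem.Set.contains st.2 p.1 then d else d.insert p.1 p.2) st.1
      = R.foldl (fun d p => d.insert p.1 p.2) st.1 := by
    rw [PySem.List.foldl_congr_mem od.items _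
      (fun d p => if (!(st.1.contains p.1)) = true then d.insert p.1 p.2 else d) st.1 ?_]
    · rw [PySem.List.foldl_if_eq_foldl_filter]
    · intro acc p _
      rw [hS]
      cases h : st.1.contains p.1 <;> simp [h]
  have hfresh : ∀ p ∈ R, st.1.contains p.1 = false := by
    intro p hp
    have := List.of_mem_filter hp
    simpa using this
  have hRnd : (R.map Prod.fst).Nodup := ((List.filter_sublist).map Prod.fst).nodup hknd
  have hA : (od.items.foldl
      (fun d p => if PySem.Set.contains st.2 p.1 then d else d.insert p.1 p.2) st.1).items
      = D.map (fun k => (k, od.getD k "")) ++ R := by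
    rw [hloop2, PySem.Dict.items_foldl_insert_fresh R Prod.fst Prod.snd st.1 hfresh hRnd,
      hitems1]
    simp
  -- ---------- B side ----------
  set n : Int := (key_order_list.length : Int) with hn
  set rank1 := (PySem.List.enumerate key_order_list).foldl
    (fun (d : PySem.Dict String Int) p => d.setdefault p.2 p.1) PySem.Dict.empty with hrank1
  set rank := (PySem.List.enumerate od.keys).foldl
    (fun (d : PySem.Dict String Int) p => d.setdefault p.2 (n + p.1)) rank1 with hrank
  have hr1 : ∀ k, rank1.get? k
      = if k ∈ key_order_list then some ((List.idxOf k key_order_list : Int)) else none := by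
    intro k
    rw [hrank1, PySem.List.foldl_congr_mem _ _
      (fun (d : PySem.Dict String Int) p => d.setdefault p.2 ((0 : Int) + p.1)) _
      (by intro acc p _; simp), pv_setdefault_enum]
    simp [PySem.Dict.get?_empty]
  have hr : ∀ k, rank.get? k = (rank1.get? k).or
      (if k ∈ od.keys then some (n + (List.idxOf k od.keys : Int)) else none) := by
    intro k
    rw [hrank, pv_setdefault_enum]
    by_cases hk : k ∈ od.keys <;> simp [hk]
  set keyf : String × String → Int := fun item => rank.getD item.1 0 with hkeyf
  have hkey_in : ∀ k, k ∈ key_order_list → keyf (k, od.getD k "") = (List.idxOf k key_order_list : Int) := by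
    intro k hk
    rw [hkeyf]
    simp only [PySem.Dict.getD_eq_get?_getD, hr, hr1, if_pos hk, Option.some_or]
    rfl
  have hkey_out : ∀ k, k ∉ key_order_list → k ∈ od.keys →
      rank.getD k 0 = n + (List.idxOf k od.keys : Int) := by
    intro k hk hmem
    simp only [PySem.Dict.getD_eq_get?_getD, hr, hr1, if_neg hk, if_pos hmem, Option.none_or]
    rfl
  -- membership facts
  have hmemD : ∀ k, k ∈ D ↔ (k ∈ key_order_list ∧ od.contains k = true) := by
    intro k
    rw [hD, PySem.Set.mem_ofList, hL, List.mem_filter]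
  -- the sorted list is exactly A's result
  have hsort : PySem.List.sorted od.items keyf = D.map (fun k => (k, od.getD k "")) ++ R := by
    apply PySem.List.sorted_eq_of_perm_of_pairwise_lt
    · -- permutation
      have hperm1 : (od.items.filter (fun p => st.1.contains p.1) ++ R).Perm od.items := by
        rw [hR]; exact List.filter_append_perm _ _
      refine List.Perm.trans (List.Perm.append_right R ?_) hperm1
      set F := od.items.filter (fun p => st.1.contains p.1) with hF
      have hFknd : (F.map Prod.fst).Nodup := ((List.filter_sublist).map Prod.fst).nodup hknd
      have hFeq : (F.map Prod.fst).map (fun k => (k, od.getD k "")) = F := by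
        rw [List.map_map]
        have : ∀ p ∈ F, ((fun k => (k, od.getD k "")) ∘ Prod.fst) p = id p := by
          intro p hp
          have hpo : p ∈ od.items := List.mem_of_mem_filter hp
          obtain ⟨k, v⟩ := p
          simp only [Function.comp, id, Prod.mk.injEq]
          exact ⟨trivial, PySem.Dict.getD_of_mem_items od hpo hknd ""⟩
        rw [List.map_congr_left this, List.map_id]
      have hDperm : D.Perm (F.map Prod.fst) := by
        rw [List.perm_ext_iff_of_nodup hDnd hFknd]
        intro k
        rw [hmemD]
        constructor
        · rintro ⟨hkol, hcon⟩
          have hkL : k ∈ L := by rw [hL, List.mem_filter]; simp [hkol, hcon]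
          have hks : st.1.contains k = true := (hcont1 k).mpr hkL
          have hkk : k ∈ od.keys := (PySem.Dict.contains_iff_mem_keys od k).mp hcon
          have : ∃ p ∈ od.items, p.1 = k := by
            simpa [PySem.Dict.keys, List.mem_map] using hkk
          obtain ⟨p, hp, hpk⟩ := this
          rw [hF, List.mem_map]
          exact ⟨p, List.mem_filter.mpr ⟨hp, by simp [hpk, hks]⟩, hpk⟩
        · intro hk
          rw [hF, List.mem_map] at hk
          obtain ⟨p, hp, hpk⟩ := hk
          have hpo : p ∈ od.items := List.mem_of_mem_filter hp
          have hcs : st.1.contains p.1 = true := by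
            have := List.of_mem_filter hp; simpa using this
          have hkL : p.1 ∈ L := (hcont1 p.1).mp hcs
          rw [← hpk]
          rw [hL, List.mem_filter] at hkL
          exact ⟨hkL.1, by simpa using hkL.2⟩
      calc (D.map (fun k => (k, od.getD k ""))).Perm
            ((F.map Prod.fst).map (fun k => (k, od.getD k ""))) := hDperm.map _
        _ = F := hFeq
    · -- strictly increasing ranks
      rw [List.pairwise_append]
      refine ⟨?_, ?_, ?_⟩
      · -- within the seeded part
        rw [List.pairwise_map]
        refine (pv_ofList_pairwise_idxOf L).imp_of_mem ?_
        intro a b ha hb hab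
        have haL : a ∈ L := (PySem.Set.mem_ofList L a).mp ha
        have hbL : b ∈ L := (PySem.Set.mem_ofList L b).mp hb
        have haK : a ∈ key_order_list := (List.mem_filter.mp (hL ▸ haL)).1
        have hbK : b ∈ key_order_list := (List.mem_filter.mp (hL ▸ hbL)).1
        rw [hkey_in a haK, hkey_in b hbK]
        have := pv_idxOf_filter_lt key_order_list (fun k => od.contains k) a b
          (hL ▸ haL) (hL ▸ hbL) hab
        exact_mod_cast this
      · -- within the remaining part
        have hkp : od.keys.Pairwise (fun a b => List.idxOf a od.keys < List.idxOf b od.keys) := by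
          have := pv_ofList_pairwise_idxOf od.keys
          rwa [pv_ofList_eq_self od.keys hknd] at this
        have hip : od.items.Pairwise
            (fun p q => List.idxOf p.1 od.keys < List.idxOf q.1 od.keys) := by
          exact (List.pairwise_map (f := Prod.fst)
            (R := fun a b => List.idxOf a od.keys < List.idxOf b od.keys)).mp hkp
        refine (hip.filter _).imp_of_mem ?_
        intro p q hp hq hpq
        have hpo : p ∈ od.items := List.mem_of_mem_filter hp
        have hqo : q ∈ od.items := List.mem_of_mem_filter hq
        have hpc : st.1.contains p.1 = false := by
          have := List.of_mem_filter hp; simpa using this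
        have hqc : st.1.contains q.1 = false := by
          have := List.of_mem_filter hq; simpa using this
        have hpK : p.1 ∉ key_order_list := by
          intro hk
          have : p.1 ∈ L := by
            rw [hL, List.mem_filter]
            refine ⟨hk, ?_⟩
            simp [PySem.Dict.contains_iff_mem_keys, PySem.Dict.mem_keys_of_mem_items od hpo]
          exact absurd ((hcont1 p.1).mpr this) (by simp [hpc])
        have hqK : q.1 ∉ key_order_list := by
          intro hk
          have : q.1 ∈ L := by
            rw [hL, List.mem_filter]
            refine ⟨hk, ?_⟩
            simp [PySem.Dict.contains_iff_mem_keys, PySem.Dict.mem_keys_of_mem_items od hqo]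
          exact absurd ((hcont1 q.1).mpr this) (by simp [hqc])
        rw [hkeyf]
        simp only []
        rw [hkey_out p.1 hpK (PySem.Dict.mem_keys_of_mem_items od hpo),
          hkey_out q.1 hqK (PySem.Dict.mem_keys_of_mem_items od hqo)]
        omega
      · -- seeded part comes strictly before the rest
        intro a ha b hb
        rw [List.mem_map] at ha
        obtain ⟨k, hkD, rfl⟩ := ha
        have hkL : k ∈ L := (PySem.Set.mem_ofList L k).mp hkD
        have hkK : k ∈ key_order_list := (List.mem_filter.mp (hL ▸ hkL)).1
        have hbo : b ∈ od.items := List.mem_of_mem_filter hb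
        have hbc : st.1.contains b.1 = false := by
          have := List.of_mem_filter hb; simpa using this
        have hbK : b.1 ∉ key_order_list := by
          intro hk
          have : b.1 ∈ L := by
            rw [hL, List.mem_filter]
            refine ⟨hk, ?_⟩
            simp [PySem.Dict.contains_iff_mem_keys, PySem.Dict.mem_keys_of_mem_items od hbo]
          exact absurd ((hcont1 b.1).mpr this) (by simp [hbc])
        rw [hkey_in k hkK]
        have hb2 : keyf b = n + (List.idxOf b.1 od.keys : Int) :=
          hkey_out b.1 hbK (PySem.Dict.mem_keys_of_mem_items od hbo)
        rw [hb2]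
        have hlt : List.idxOf k key_order_list < key_order_list.length :=
          List.idxOf_lt_length_of_mem hkK
        rw [hn]
        omega
  -- ---------- assemble ----------
  rw [hA, hsort, pv_update_eq_foldl]
  have hresnd : ((D.map (fun k => (k, od.getD k "")) ++ R).map Prod.fst).Nodup := by
    have hperm : (D.map (fun k => (k, od.getD k "")) ++ R).Perm od.items := by
      rw [← hsort]; exact PySem.List.sorted_perm od.items keyf false
    exact ((hperm.map Prod.fst).nodup_iff).mpr hknd
  have hfresh' : ∀ p ∈ (D.map (fun k => (k, od.getD k "")) ++ R),
      (PySem.Dict.empty : PySem.Dict String String).contains p.1 = false := by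
    intro p _; simp [PySem.Dict.contains_empty]
  rw [PySem.Dict.items_foldl_insert_fresh _ Prod.fst Prod.snd _ hfresh' hresnd]
  simp [PySem.Dict.empty, Function.comp]
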